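-- pv_equiv track=rewrite | github.com/seho27060/oct-algo-study | 1024/1024_won.py | solution
-- ===== SOURCE A (Python) =====
-- def solution(rows, columns, queries):
--     answer = []
--     G = []
--     for row in range(rows):
--         G.append([i for i in range(row * columns + 1, (row + 1) * columns + 1)])
--     for querie in queries:
--         querie = [i - 1 for i in querie]
--         tmp = G[querie[0]][querie[1]]
--         minV = tmp
--
--         for i in range(querie[0] + 1, querie[2] + 1):
--             G[i - 1][querie[1]] = G[i][querie[1]]
--             minV = min(minV, G[i][querie[1]])
--
--         for i in range(querie[1] + 1, querie[3] + 1):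
--             G[querie[2]][i - 1] = G[querie[2]][i]
--             minV = min(minV, G[querie[2]][i])
--
--         for i in range(querie[2] - 1, querie[0] - 1, -1):
--             G[i + 1][querie[3]] = G[i][querie[3]]
--             minV = min(minV, G[i][querie[3]])
--
--         for i in range(querie[3] - 1, querie[1] - 1, -1):
--             G[querie[0]][i + 1] = G[querie[0]][i]
--             minV = min(minV, G[querie[0]][i])
--
--         G[querie[0]][querie[1] + 1] = tmp
--
--         answer.append(minV)
--
--     return answer
-- ===== SOURCE B (Python) =====
-- def solution(rows, columns, queries):
--     # Ring decomposition: gather the border values clockwise, take min once,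
--     # rotate the ring by one and scatter it back (vs A's four in-place shift loops).
--     G = [[r * columns + c + 1 for c in range(columns)] for r in range(rows)]
--     answer = []
--     for q in queries:
--         r0, c0, r1, c1 = q[0] - 1, q[1] - 1, q[2] - 1, q[3] - 1
--         pos = ([(r0, c) for c in range(c0, c1)]          # top, left -> right
--                + [(r, c1) for r in range(r0, r1)]        # right, top -> bottom
--                + [(r1, c) for c in range(c1, c0, -1)]    # bottom, right -> left
--                + [(r, c0) for r in range(r1, r0, -1)])   # left, bottom -> top
--         ring = [G[r][c] for r, c in pos]
--         answer.append(min(ring))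
--         rotated = ring[-1:] + ring[:-1]
--         for (r, c), v in zip(pos, rotated):
--             G[r][c] = v
--     return answer
-- ===== Notes on version B (the rewrite author's own statement) =====
-- stated objective: simpler
-- what changed: A rotates each rectangle border in place with four separate shift loops that interleave the min computation; B gathers the border into one ring list in clockwise order, takes min(ring) in a single call, rotates the list by one and scatters it back.
-- outside the precondition, e.g. on solution(3, 3, [[1, 1, 1, 1]]): A returns [1], B raises ValueError; on solution(3, 3, [[2, 2, 1, 1]]): A returns [5], B raises ValueError; on solution(3, 4, [[-2, 0, 1, -2]]): A returns [4], B returns [2]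
import Mathlib
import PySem

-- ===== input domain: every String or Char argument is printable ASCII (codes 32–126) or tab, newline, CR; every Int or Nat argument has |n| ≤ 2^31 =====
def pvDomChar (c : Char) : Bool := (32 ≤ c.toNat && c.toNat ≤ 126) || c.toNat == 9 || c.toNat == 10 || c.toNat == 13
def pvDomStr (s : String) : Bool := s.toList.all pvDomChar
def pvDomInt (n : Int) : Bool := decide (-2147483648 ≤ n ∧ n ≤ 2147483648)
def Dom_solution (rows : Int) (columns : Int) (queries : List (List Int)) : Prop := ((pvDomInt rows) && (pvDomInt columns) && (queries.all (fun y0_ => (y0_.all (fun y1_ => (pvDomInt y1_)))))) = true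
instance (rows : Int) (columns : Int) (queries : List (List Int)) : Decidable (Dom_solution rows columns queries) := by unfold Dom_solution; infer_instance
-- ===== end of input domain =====

-- B gathers each rectangle border into one ring list, takes min once and scatters the
-- rotated ring back (vs A's four in-place shift loops); objective: simpler decomposition.
-- In both ports the mutable list-of-lists grid is modeled as a total function
-- Int → Int → Int (initialised with the exact values A's comprehension builds); this is
-- exact for the in-bounds accesses Pre_solution guarantees.

-- ===== PORT A =====
-- G[i][j] = v  (function update on the grid model)
def pvUpd (g : Int → Int → Int) (i j v : Int) : Int → Int → Int :=
  fun r c => if r = i ∧ c = j then v else g r c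

-- one iteration of A's `for querie in queries` body, state = (grid, minV); appended value is .2
def pvStepA (g : Int → Int → Int) (q : List Int) : (Int → Int → Int) × Int :=
  let qd := q.map (fun i => i - 1)                       -- querie = [i - 1 for i in querie]
  let q0 := PySem.List.pyGetD qd 0 0                    -- querie[0]  (in range under Pre_)
  let q1 := PySem.List.pyGetD qd 1 0
  let q2 := PySem.List.pyGetD qd 2 0
  let q3 := PySem.List.pyGetD qd 3 0
  let tmp := g q0 q1
  let s1 := (PySem.List.pyRange (q0 + 1) (q2 + 1) 1).foldl
      (fun (st : (Int → Int → Int) × Int) i =>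
        (pvUpd st.1 (i - 1) q1 (st.1 i q1), min st.2 (st.1 i q1))) (g, tmp)
  let s2 := (PySem.List.pyRange (q1 + 1) (q3 + 1) 1).foldl
      (fun (st : (Int → Int → Int) × Int) i =>
        (pvUpd st.1 q2 (i - 1) (st.1 q2 i), min st.2 (st.1 q2 i))) s1
  let s3 := (PySem.List.pyRange (q2 - 1) (q0 - 1) (-1)).foldl
      (fun (st : (Int → Int → Int) × Int) i =>
        (pvUpd st.1 (i + 1) q3 (st.1 i q3), min st.2 (st.1 i q3))) s2
  let s4 := (PySem.List.pyRange (q3 - 1) (q1 - 1) (-1)).foldl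
      (fun (st : (Int → Int → Int) × Int) i =>
        (pvUpd st.1 q0 (i + 1) (st.1 q0 i), min st.2 (st.1 q0 i))) s3
  (pvUpd s4.1 q0 (q1 + 1) tmp, s4.2)

def solution (rows : Int) (columns : Int) (queries : List (List Int)) : List Int :=
  -- G[row] = [row*columns+1, …, (row+1)*columns]: cell (r, c) holds r*columns + c + 1
  let st := queries.foldl
    (fun (st : (Int → Int → Int) × List Int) q =>
      let r := pvStepA st.1 q
      (r.1, st.2 ++ [r.2]))
    ((fun r c => r * columns + c + 1), [])
  st.2

-- ===== PORT B =====
-- one iteration of Source B's loop body: ring positions clockwise, min, rotate, scatter back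
def pvStepB (g : Int → Int → Int) (q : List Int) : (Int → Int → Int) × Int :=
  let r0 := PySem.List.pyGetD q 0 0 - 1
  let c0 := PySem.List.pyGetD q 1 0 - 1
  let r1 := PySem.List.pyGetD q 2 0 - 1
  let c1 := PySem.List.pyGetD q 3 0 - 1
  let pos : List (Int × Int) :=
    (PySem.List.pyRange c0 c1 1).map (fun c => (r0, c))
    ++ (PySem.List.pyRange r0 r1 1).map (fun r => (r, c1))
    ++ (PySem.List.pyRange c1 c0 (-1)).map (fun c => (r1, c))
    ++ (PySem.List.pyRange r1 r0 (-1)).map (fun r => (r, c0))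
  let ring := pos.map (fun p => g p.1 p.2)
  let mn := (PySem.List.min? ring (fun x => x)).getD 0   -- min(ring); ring ≠ [] under Pre_
  let rotated := PySem.List.slice ring (some (-1)) none ++ PySem.List.slice ring none (some (-1))
  let g' := (pos.zip rotated).foldl (fun g' pv => pvUpd g' pv.1.1 pv.1.2 pv.2) g
  (g', mn)

def solution_alt (rows : Int) (columns : Int) (queries : List (List Int)) : List Int :=
  let st := queries.foldl
    (fun (st : (Int → Int → Int) × List Int) q =>
      let r := pvStepB st.1 q
      (r.1, st.2 ++ [r.2]))
    ((fun r c => r * columns + c + 1), [])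
  st.2

-- ===== PRECONDITION & SPEC =====
-- Pre_ restricts queries to the problem's well-formed 1-indexed rectangles
-- (≥ 4 entries, 1 ≤ r1 < r2 ≤ rows, 1 ≤ c1 < c2 ≤ columns). Outside it A either raises
-- IndexError or, on degenerate/inverted/negative-coordinate rectangles, returns values
-- produced by negative-index wraparound — accidental corners on which B's ring is empty
-- and B itself raises ValueError.
def Pre_solution (rows : Int) (columns : Int) (queries : List (List Int)) : Prop :=
  ∀ q ∈ queries, 4 ≤ q.length ∧
    1 ≤ q.getD 0 0 ∧ q.getD 0 0 < q.getD 2 0 ∧ q.getD 2 0 ≤ rows ∧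
    1 ≤ q.getD 1 0 ∧ q.getD 1 0 < q.getD 3 0 ∧ q.getD 3 0 ≤ columns

instance (rows : Int) (columns : Int) (queries : List (List Int)) : Decidable (Pre_solution rows columns queries) := by
  unfold Pre_solution; infer_instance

def pvWitness_solution : Int × Int × List (List Int) := (3, 3, [[1, 1, 2, 2], [1, 2, 3, 3]])

def Spec_solution (rows : Int) (columns : Int) (queries : List (List Int)) (out : List Int) : Prop := out = solution_alt rows columns queries
instance (rows : Int) (columns : Int) (queries : List (List Int)) (out : List Int) : Decidable (Spec_solution rows columns queries out) := by unfold Spec_solution; infer_instance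

-- ===== CLAIM (what is proved, stated in full; the proofs are below) =====
def Claim_equal_solution : Prop := ∀ (rows : Int) (columns : Int) (queries : List (List Int)), Dom_solution rows columns queries → Pre_solution rows columns queries → Spec_solution rows columns queries (solution rows columns queries)

-- ===== LEMMAS AND PROOFS =====

theorem pvUpd_apply (g : Int → Int → Int) (i j v r c : Int) :
    pvUpd g i j v r c = if r = i ∧ c = j then v else g r c := rfl

-- shift a step-1 range under a map
theorem pyRange_one_map_shift {α : Type} (f : Int → α) (a b : Int) :
    (PySem.List.pyRange (a + 1) (b + 1) 1).map f
      = (PySem.List.pyRange a b 1).map (fun i => f (i + 1)) := by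
  simp only [PySem.List.pyRange_one, List.map_map]
  have h : b + 1 - (a + 1) = b - a := by ring
  rw [h]
  apply List.map_congr_left
  intro k _
  simp only [Function.comp_apply]
  congr 1
  ring

-- shift a step-(-1) range under a map
theorem pyRange_neg_one_map_shift {α : Type} (f : Int → α) (a b : Int) :
    (PySem.List.pyRange (a - 1) (b - 1) (-1)).map f
      = (PySem.List.pyRange a b (-1)).map (fun i => f (i - 1)) := by
  simp only [PySem.List.pyRange_neg_one, List.map_map]
  have h : a - 1 - (b - 1) = a - b := by ring
  rw [h]
  apply List.map_congr_left
  intro k _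
  simp only [Function.comp_apply]
  congr 1
  ring

-- split the last element off a countdown range
theorem pyRange_neg_one_append_last (a b : Int) (h : b < a) :
    PySem.List.pyRange a b (-1) = PySem.List.pyRange a (b + 1) (-1) ++ [b + 1] := by
  rw [PySem.List.pyRange_neg_one_eq_reverse, PySem.List.pyRange_neg_one_eq_reverse,
    PySem.List.pyRange_one_cons (by omega : b + 1 < a + 1)]
  simp

theorem drop_concat_last {α : Type} (X : List α) (x : α) :
    (X ++ [x]).drop ((X ++ [x]).length - 1) = [x] := by simp

theorem foldl_min_le_init (l : List Int) : ∀ x : Int, l.foldl min x ≤ x := by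
  induction l with
  | nil => intro x; simp
  | cons y t ih =>
    intro x
    calc t.foldl min (min x y) ≤ min x y := ih _
    _ ≤ x := min_le_left _ _

theorem foldl_min_le_of_mem (l : List Int) (y : Int) (hy : y ∈ l) :
    ∀ x : Int, l.foldl min x ≤ y := by
  induction l with
  | nil => cases hy
  | cons z t ih =>
    intro x
    rcases List.mem_cons.mp hy with h | h
    · subst h
      calc t.foldl min (min x y) ≤ min x y := foldl_min_le_init t _
      _ ≤ y := min_le_right _ _
    · exact ih h _

-- writing a list of cells of one row, each value a function of the column only
theorem rowWrite (a0 : Int) (f : Int → Int) :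
    ∀ (l : List Int) (g : Int → Int → Int) (r c : Int),
      (l.foldl (fun g' s => pvUpd g' a0 s (f s)) g) r c
        = if r = a0 ∧ c ∈ l then f c else g r c := by
  intro l
  induction l with
  | nil => intro g r c; simp
  | cons s t ih =>
    intro g r c
    simp only [List.foldl_cons, ih, pvUpd_apply, List.mem_cons]
    by_cases h1 : r = a0
    · by_cases h2 : c ∈ t
      · simp [h1, h2]
      · by_cases h3 : c = s
        · subst h3; simp [h1, h2]
        · simp [h1, h2, h3]
    · simp [h1]

-- writing a list of cells of one column, each value a function of the row only
theorem colWrite (b0 : Int) (f : Int → Int) :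
    ∀ (l : List Int) (g : Int → Int → Int) (r c : Int),
      (l.foldl (fun g' s => pvUpd g' s b0 (f s)) g) r c
        = if c = b0 ∧ r ∈ l then f r else g r c := by
  intro l
  induction l with
  | nil => intro g r c; simp
  | cons s t ih =>
    intro g r c
    simp only [List.foldl_cons, ih, pvUpd_apply, List.mem_cons]
    by_cases h1 : c = b0
    · by_cases h2 : r ∈ t
      · simp [h1, h2]
      · by_cases h3 : r = s
        · subst h3; simp [h1, h2]
        · simp [h1, h2, h3]
    · simp [h1]

-- A's loop 1: shift column w0 up over rows b..b+n-1 (reads see the original grid)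
theorem loopCol_up (w0 : Int) :
    ∀ (n : Nat) (b : Int) (g : Int → Int → Int) (m : Int),
      (PySem.List.pyRange b (b + (n : Int)) 1).foldl
        (fun (st : (Int → Int → Int) × Int) i =>
          (pvUpd st.1 (i - 1) w0 (st.1 i w0), min st.2 (st.1 i w0))) (g, m)
      = ((fun r c => if c = w0 ∧ b - 1 ≤ r ∧ r ≤ b + (n : Int) - 2 then g (r + 1) w0 else g r c),
         ((PySem.List.pyRange b (b + (n : Int)) 1).map (fun i => g i w0)).foldl min m) := by
  intro n
  induction n with
  | zero =>
    intro b g m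
    rw [PySem.List.pyRange_one_eq_nil (by omega)]
    simp only [List.foldl_nil, List.map_nil]
    rw [Prod.mk.injEq]
    exact ⟨by funext r c; rw [if_neg (by omega)], rfl⟩
  | succ n ih =>
    intro b g m
    have he : b + ((n + 1 : Nat) : Int) = (b + 1) + (n : Int) := by push_cast; ring
    rw [he, PySem.List.pyRange_one_cons (by omega)]
    simp only [List.foldl_cons, List.map_cons]
    rw [ih]
    rw [Prod.mk.injEq]
    constructor
    · funext r c
      simp only [pvUpd_apply]
      split_ifs <;> first | rfl | omega | (congr 1 <;> first | rfl | omega | (congr 1 <;> omega))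
    · congr 1
      apply List.map_congr_left
      intro i hi
      rw [PySem.List.mem_pyRange_one] at hi
      rw [pvUpd_apply, if_neg (by rintro ⟨h1, h2⟩; omega)]

-- A's loop 2: shift row w0 left over columns b..b+n-1
theorem loopRow_left (w0 : Int) :
    ∀ (n : Nat) (b : Int) (g : Int → Int → Int) (m : Int),
      (PySem.List.pyRange b (b + (n : Int)) 1).foldl
        (fun (st : (Int → Int → Int) × Int) i =>
          (pvUpd st.1 w0 (i - 1) (st.1 w0 i), min st.2 (st.1 w0 i))) (g, m)
      = ((fun r c => if r = w0 ∧ b - 1 ≤ c ∧ c ≤ b + (n : Int) - 2 then g w0 (c + 1) else g r c),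
         ((PySem.List.pyRange b (b + (n : Int)) 1).map (fun i => g w0 i)).foldl min m) := by
  intro n
  induction n with
  | zero =>
    intro b g m
    rw [PySem.List.pyRange_one_eq_nil (by omega)]
    simp only [List.foldl_nil, List.map_nil]
    rw [Prod.mk.injEq]
    exact ⟨by funext r c; rw [if_neg (by omega)], rfl⟩
  | succ n ih =>
    intro b g m
    have he : b + ((n + 1 : Nat) : Int) = (b + 1) + (n : Int) := by push_cast; ring
    rw [he, PySem.List.pyRange_one_cons (by omega)]
    simp only [List.foldl_cons, List.map_cons]
    rw [ih]
    rw [Prod.mk.injEq]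
    constructor
    · funext r c
      simp only [pvUpd_apply]
      split_ifs <;> first | rfl | omega | (congr 1 <;> first | rfl | omega | (congr 1 <;> omega))
    · congr 1
      apply List.map_congr_left
      intro i hi
      rw [PySem.List.mem_pyRange_one] at hi
      rw [pvUpd_apply, if_neg (by rintro ⟨h1, h2⟩; omega)]

-- A's loop 3: shift column w0 down over rows b+n..b+1 (countdown)
theorem loopCol_down (w0 : Int) :
    ∀ (n : Nat) (b : Int) (g : Int → Int → Int) (m : Int),
      (PySem.List.pyRange (b + (n : Int)) b (-1)).foldl
        (fun (st : (Int → Int → Int) × Int) i =>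
          (pvUpd st.1 (i + 1) w0 (st.1 i w0), min st.2 (st.1 i w0))) (g, m)
      = ((fun r c => if c = w0 ∧ b + 2 ≤ r ∧ r ≤ b + 1 + (n : Int) then g (r - 1) w0 else g r c),
         ((PySem.List.pyRange (b + (n : Int)) b (-1)).map (fun i => g i w0)).foldl min m) := by
  intro n
  induction n with
  | zero =>
    intro b g m
    rw [PySem.List.pyRange_neg_one_eq_nil (by omega)]
    simp only [List.foldl_nil, List.map_nil]
    rw [Prod.mk.injEq]
    exact ⟨by funext r c; rw [if_neg (by omega)], rfl⟩
  | succ n ih =>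
    intro b g m
    have he : b + ((n + 1 : Nat) : Int) = (b + (n : Int)) + 1 := by push_cast; ring
    rw [he, PySem.List.pyRange_neg_one_cons (a := b + (n : Int) + 1) (b := b) (by omega)]
    have he2 : b + (n : Int) + 1 - 1 = b + (n : Int) := by ring
    rw [he2]
    simp only [List.foldl_cons, List.map_cons]
    rw [ih]
    rw [Prod.mk.injEq]
    constructor
    · funext r c
      simp only [pvUpd_apply]
      split_ifs <;> first | rfl | omega | (congr 1 <;> first | rfl | omega | (congr 1 <;> omega))
    · congr 1
      apply List.map_congr_left
      intro i hi
      rw [PySem.List.mem_pyRange_neg_one] at hi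
      rw [pvUpd_apply, if_neg (by rintro ⟨h1, h2⟩; omega)]

-- A's loop 4: shift row w0 right over columns b+n..b+1 (countdown)
theorem loopRow_right (w0 : Int) :
    ∀ (n : Nat) (b : Int) (g : Int → Int → Int) (m : Int),
      (PySem.List.pyRange (b + (n : Int)) b (-1)).foldl
        (fun (st : (Int → Int → Int) × Int) i =>
          (pvUpd st.1 w0 (i + 1) (st.1 w0 i), min st.2 (st.1 w0 i))) (g, m)
      = ((fun r c => if r = w0 ∧ b + 2 ≤ c ∧ c ≤ b + 1 + (n : Int) then g w0 (c - 1) else g r c),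
         ((PySem.List.pyRange (b + (n : Int)) b (-1)).map (fun i => g w0 i)).foldl min m) := by
  intro n
  induction n with
  | zero =>
    intro b g m
    rw [PySem.List.pyRange_neg_one_eq_nil (by omega)]
    simp only [List.foldl_nil, List.map_nil]
    rw [Prod.mk.injEq]
    exact ⟨by funext r c; rw [if_neg (by omega)], rfl⟩
  | succ n ih =>
    intro b g m
    have he : b + ((n + 1 : Nat) : Int) = (b + (n : Int)) + 1 := by push_cast; ring
    rw [he, PySem.List.pyRange_neg_one_cons (a := b + (n : Int) + 1) (b := b) (by omega)]
    have he2 : b + (n : Int) + 1 - 1 = b + (n : Int) := by ring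
    rw [he2]
    simp only [List.foldl_cons, List.map_cons]
    rw [ih]
    rw [Prod.mk.injEq]
    constructor
    · funext r c
      simp only [pvUpd_apply]
      split_ifs <;> first | rfl | omega | (congr 1 <;> first | rfl | omega | (congr 1 <;> omega))
    · congr 1
      apply List.map_congr_left
      intro i hi
      rw [PySem.List.mem_pyRange_neg_one] at hi
      rw [pvUpd_apply, if_neg (by rintro ⟨h1, h2⟩; omega)]

-- the value written back at ring position p (B's rotated ring, as a function of the position)
def pvF (g : Int → Int → Int) (A B C D : Int) : Int × Int → Int := fun p =>
  if p.1 = A then (if p.2 = B then g (A + 1) B else g A (p.2 - 1))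
  else if p.2 = D then g (p.1 - 1) D
  else if p.1 = C then g C (p.2 + 1)
  else g (p.1 + 1) B

-- pyGetD on an explicit ≥4-element query
theorem pyGetD_q0 (a b c d : Int) (t : List Int) : PySem.List.pyGetD (a::b::c::d::t) 0 0 = a := by
  simp [PySem.List.pyGetD, PySem.List.pyGet?, PySem.List.pyIdx?]
  rw [if_pos (by omega)]
  simp
theorem pyGetD_q1 (a b c d : Int) (t : List Int) : PySem.List.pyGetD (a::b::c::d::t) 1 0 = b := by
  simp [PySem.List.pyGetD, PySem.List.pyGet?, PySem.List.pyIdx?]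
  rw [if_pos (by omega)]
  simp
theorem pyGetD_q2 (a b c d : Int) (t : List Int) : PySem.List.pyGetD (a::b::c::d::t) 2 0 = c := by
  simp [PySem.List.pyGetD, PySem.List.pyGet?, PySem.List.pyIdx?]
  rw [if_pos (by omega)]
  simp
theorem pyGetD_q3 (a b c d : Int) (t : List Int) : PySem.List.pyGetD (a::b::c::d::t) 3 0 = d := by
  simp [PySem.List.pyGetD, PySem.List.pyGet?, PySem.List.pyIdx?]
  rw [if_pos (by omega)]
  simp

set_option maxHeartbeats 3000000 in
theorem step_eq (g : Int → Int → Int) (q : List Int) (hlen : 4 ≤ q.length)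
    (h02 : q.getD 0 0 < q.getD 2 0) (h13 : q.getD 1 0 < q.getD 3 0) :
    pvStepA g q = pvStepB g q := by
  rcases q with _ | ⟨e0, q⟩; · simp at hlen
  rcases q with _ | ⟨e1, q⟩; · simp at hlen
  rcases q with _ | ⟨e2, q⟩; · simp at hlen
  rcases q with _ | ⟨e3, t⟩; · simp at hlen
  simp only [List.getD_cons_zero, List.getD_cons_succ] at h02 h13
  simp only [pvStepA, pvStepB, List.map_cons, pyGetD_q0, pyGetD_q1, pyGetD_q2, pyGetD_q3]
  set A := e0 - 1 with hA
  set B := e1 - 1 with hB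
  set C := e2 - 1 with hC
  set D := e3 - 1 with hD
  have hAC : A < C := by omega
  have hBD : B < D := by omega
  -- characterize A's four loops
  rw [show (C : Int) + 1 = (A + 1) + (((C - A).toNat : Nat) : Int) by omega, loopCol_up]
  rw [show (D : Int) + 1 = (B + 1) + (((D - B).toNat : Nat) : Int) by omega, loopRow_left]
  rw [show (C : Int) - 1 = (A - 1) + (((C - A).toNat : Nat) : Int) by omega, loopCol_down]
  rw [show (D : Int) - 1 = (B - 1) + (((D - B).toNat : Nat) : Int) by omega, loopRow_right]
  -- clean A's later min-lists down to reads of the original grid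
  have hM2 : List.map
      (fun i => if i = B ∧ A + 1 - 1 ≤ C ∧ C ≤ A + 1 + ((C - A).toNat : Int) - 2 then g (C + 1) B else g C i)
      (PySem.List.pyRange (B + 1) (B + 1 + ((D - B).toNat : Int)) 1)
      = List.map (fun i => g C i) (PySem.List.pyRange (B + 1) (B + 1 + ((D - B).toNat : Int)) 1) :=
    List.map_congr_left (fun i hi => by
      rw [PySem.List.mem_pyRange_one] at hi
      rw [if_neg (by omega)])
  have hM3 : List.map
      (fun i =>
        if i = C ∧ B + 1 - 1 ≤ D ∧ D ≤ B + 1 + ((D - B).toNat : Int) - 2 then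
          if D + 1 = B ∧ A + 1 - 1 ≤ C ∧ C ≤ A + 1 + ((C - A).toNat : Int) - 2 then g (C + 1) B else g C (D + 1)
        else if D = B ∧ A + 1 - 1 ≤ i ∧ i ≤ A + 1 + ((C - A).toNat : Int) - 2 then g (i + 1) B else g i D)
      (PySem.List.pyRange (A - 1 + ((C - A).toNat : Int)) (A - 1) (-1))
      = List.map (fun i => g i D) (PySem.List.pyRange (A - 1 + ((C - A).toNat : Int)) (A - 1) (-1)) :=
    List.map_congr_left (fun i hi => by
      rw [PySem.List.mem_pyRange_neg_one] at hi
      rw [if_neg (by omega), if_neg (by omega)])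
  have hM4 : List.map
      (fun i =>
        if i = D ∧ A - 1 + 2 ≤ A ∧ A ≤ A - 1 + 1 + ((C - A).toNat : Int) then
          if A - 1 = C ∧ B + 1 - 1 ≤ D ∧ D ≤ B + 1 + ((D - B).toNat : Int) - 2 then
            if D + 1 = B ∧ A + 1 - 1 ≤ C ∧ C ≤ A + 1 + ((C - A).toNat : Int) - 2 then g (C + 1) B else g C (D + 1)
          else
            if D = B ∧ A + 1 - 1 ≤ A - 1 ∧ A - 1 ≤ A + 1 + ((C - A).toNat : Int) - 2 then g (A - 1 + 1) B
            else g (A - 1) D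
        else
          if A = C ∧ B + 1 - 1 ≤ i ∧ i ≤ B + 1 + ((D - B).toNat : Int) - 2 then
            if i + 1 = B ∧ A + 1 - 1 ≤ C ∧ C ≤ A + 1 + ((C - A).toNat : Int) - 2 then g (C + 1) B else g C (i + 1)
          else if i = B ∧ A + 1 - 1 ≤ A ∧ A ≤ A + 1 + ((C - A).toNat : Int) - 2 then g (A + 1) B else g A i)
      (PySem.List.pyRange (B - 1 + ((D - B).toNat : Int)) (B - 1) (-1))
      = List.map (fun i => if i = B then g (A + 1) B else g A i)
          (PySem.List.pyRange (B - 1 + ((D - B).toNat : Int)) (B - 1) (-1)) :=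
    List.map_congr_left (fun i hi => by
      rw [PySem.List.mem_pyRange_neg_one] at hi
      rw [if_neg (by omega)]
      by_cases hiB : i = B
      · rw [if_neg (by omega), if_pos ⟨hiB, by omega⟩, if_pos hiB]
      · rw [if_neg (by omega), if_neg (by rintro ⟨h1, _⟩; exact hiB h1), if_neg hiB])
  rw [hM2, hM3, hM4]
  -- normalize range endpoints back to closed form
  rw [show A + 1 + (((C - A).toNat : Nat) : Int) = C + 1 by omega,
      show B + 1 + (((D - B).toNat : Nat) : Int) = D + 1 by omega,
      show A - 1 + (((C - A).toNat : Nat) : Int) = C - 1 by omega,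
      show B - 1 + (((D - B).toNat : Nat) : Int) = D - 1 by omega]
  set P : List (Int × Int) :=
    (PySem.List.pyRange B D 1).map (fun c => (A, c))
    ++ (PySem.List.pyRange A C 1).map (fun r => (r, D))
    ++ (PySem.List.pyRange D B (-1)).map (fun c => (C, c))
    ++ (PySem.List.pyRange C A (-1)).map (fun r => (r, B)) with hP
  -- the ring of border values, with the last one (left column, row A+1) split off
  have hringTv : P.map (fun p => g p.1 p.2)
      = ((PySem.List.pyRange B D 1).map (fun c => g A c)
        ++ (PySem.List.pyRange A C 1).map (fun r => g r D)
        ++ (PySem.List.pyRange D B (-1)).map (fun c => g C c)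
        ++ (PySem.List.pyRange C (A + 1) (-1)).map (fun r => g r B)) ++ [g (A + 1) B] := by
    rw [hP, pyRange_neg_one_append_last C A hAC]
    simp [List.map_append, List.map_map, Function.comp_def, List.append_assoc]
  have hlast : PySem.List.slice (P.map (fun p => g p.1 p.2)) (some (-1)) none = [g (A + 1) B] := by
    rw [PySem.List.slice_from_neg_one, hringTv]
    exact drop_concat_last _ _
  have hdrop : PySem.List.slice (P.map (fun p => g p.1 p.2)) none (some (-1))
      = (PySem.List.pyRange B D 1).map (fun c => g A c)
        ++ (PySem.List.pyRange A C 1).map (fun r => g r D)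
        ++ (PySem.List.pyRange D B (-1)).map (fun c => g C c)
        ++ (PySem.List.pyRange C (A + 1) (-1)).map (fun r => g r B) := by
    rw [PySem.List.slice_to_neg_one, hringTv, List.dropLast_concat]
  rw [hlast, hdrop]
  -- rotated ring = pvF applied to each border position
  have hseg1 : (PySem.List.pyRange B D 1).map (fun c => pvF g A B C D (A, c))
      = g (A + 1) B :: (PySem.List.pyRange B (D - 1) 1).map (fun c => g A c) := by
    rw [PySem.List.pyRange_one_cons hBD, List.map_cons]
    have h1 : pvF g A B C D (A, B) = g (A + 1) B := by
      simp only [pvF]; split_ifs <;> first | rfl | omega | (congr 1 <;> omega)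
    have h2 : (PySem.List.pyRange (B + 1) D 1).map (fun c => pvF g A B C D (A, c))
        = (PySem.List.pyRange (B + 1) D 1).map (fun c => g A (c - 1)) :=
      List.map_congr_left (fun c hc => by
        rw [PySem.List.mem_pyRange_one] at hc
        simp only [pvF]; split_ifs <;> first | rfl | omega | (congr 1 <;> omega))
    have h3 := pyRange_one_map_shift (fun c => g A (c - 1)) B (D - 1)
    rw [show (D - 1 : Int) + 1 = D by ring] at h3
    rw [h1, h2, h3]
    exact congrArg _ (List.map_congr_left (fun i _ => by first | rw [show i + 1 - 1 = i by ring] | rw [show i - 1 + 1 = i by ring]))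
  have hseg2 : (PySem.List.pyRange A C 1).map (fun r => pvF g A B C D (r, D))
      = g A (D - 1) :: (PySem.List.pyRange A (C - 1) 1).map (fun r => g r D) := by
    rw [PySem.List.pyRange_one_cons hAC, List.map_cons]
    have h1 : pvF g A B C D (A, D) = g A (D - 1) := by
      simp only [pvF]; split_ifs <;> first | rfl | omega | (congr 1 <;> omega)
    have h2 : (PySem.List.pyRange (A + 1) C 1).map (fun r => pvF g A B C D (r, D))
        = (PySem.List.pyRange (A + 1) C 1).map (fun r => g (r - 1) D) :=
      List.map_congr_left (fun r hr => by
        rw [PySem.List.mem_pyRange_one] at hr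
        simp only [pvF]; split_ifs <;> first | rfl | omega | (congr 1 <;> omega))
    have h3 := pyRange_one_map_shift (fun r => g (r - 1) D) A (C - 1)
    rw [show (C - 1 : Int) + 1 = C by ring] at h3
    rw [h1, h2, h3]
    exact congrArg _ (List.map_congr_left (fun i _ => by first | rw [show i + 1 - 1 = i by ring] | rw [show i - 1 + 1 = i by ring]))
  have hseg3 : (PySem.List.pyRange D B (-1)).map (fun c => pvF g A B C D (C, c))
      = g (C - 1) D :: (PySem.List.pyRange D (B + 1) (-1)).map (fun c => g C c) := by
    rw [PySem.List.pyRange_neg_one_cons hBD, List.map_cons]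
    have h1 : pvF g A B C D (C, D) = g (C - 1) D := by
      simp only [pvF]; split_ifs <;> first | rfl | omega | (congr 1 <;> omega)
    have h2 : (PySem.List.pyRange (D - 1) B (-1)).map (fun c => pvF g A B C D (C, c))
        = (PySem.List.pyRange (D - 1) B (-1)).map (fun c => g C (c + 1)) :=
      List.map_congr_left (fun c hc => by
        rw [PySem.List.mem_pyRange_neg_one] at hc
        simp only [pvF]; split_ifs <;> first | rfl | omega | (congr 1 <;> omega))
    have h3 := pyRange_neg_one_map_shift (fun c => g C (c + 1)) D (B + 1)
    rw [show (B + 1 : Int) - 1 = B by ring] at h3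
    rw [h1, h2, h3]
    exact congrArg _ (List.map_congr_left (fun i _ => by first | rw [show i + 1 - 1 = i by ring] | rw [show i - 1 + 1 = i by ring]))
  have hseg4 : (PySem.List.pyRange C A (-1)).map (fun r => pvF g A B C D (r, B))
      = g C (B + 1) :: (PySem.List.pyRange C (A + 1) (-1)).map (fun r => g r B) := by
    rw [PySem.List.pyRange_neg_one_cons hAC, List.map_cons]
    have h1 : pvF g A B C D (C, B) = g C (B + 1) := by
      simp only [pvF]; split_ifs <;> first | rfl | omega | (congr 1 <;> omega)
    have h2 : (PySem.List.pyRange (C - 1) A (-1)).map (fun r => pvF g A B C D (r, B))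
        = (PySem.List.pyRange (C - 1) A (-1)).map (fun r => g (r + 1) B) :=
      List.map_congr_left (fun r hr => by
        rw [PySem.List.mem_pyRange_neg_one] at hr
        simp only [pvF]; split_ifs <;> first | rfl | omega | (congr 1 <;> omega))
    have h3 := pyRange_neg_one_map_shift (fun r => g (r + 1) B) C (A + 1)
    rw [show (A + 1 : Int) - 1 = A by ring] at h3
    rw [h1, h2, h3]
    exact congrArg _ (List.map_congr_left (fun i _ => by first | rw [show i + 1 - 1 = i by ring] | rw [show i - 1 + 1 = i by ring]))
  have hsp1 := PySem.List.pyRange_one_succ_right (a := B) (b := D - 1) (by omega)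
  rw [show (D - 1 : Int) + 1 = D by ring] at hsp1
  have hsp2 := PySem.List.pyRange_one_succ_right (a := A) (b := C - 1) (by omega)
  rw [show (C - 1 : Int) + 1 = C by ring] at hsp2
  have hsp3 := pyRange_neg_one_append_last D B hBD
  have hrot : [g (A + 1) B]
      ++ ((PySem.List.pyRange B D 1).map (fun c => g A c)
        ++ (PySem.List.pyRange A C 1).map (fun r => g r D)
        ++ (PySem.List.pyRange D B (-1)).map (fun c => g C c)
        ++ (PySem.List.pyRange C (A + 1) (-1)).map (fun r => g r B))
      = P.map (pvF g A B C D) := by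
    rw [hP]
    simp only [List.map_append, List.map_map, Function.comp_def]
    rw [hseg1, hseg2, hseg3, hseg4, hsp1, hsp2, hsp3]
    simp [List.append_assoc]
  rw [hrot, ← List.map_prod_left_eq_zip]
  -- scatter the rotated ring back: four per-segment write loops
  have hwrite : (List.map (fun x => (x, pvF g A B C D x)) P).foldl
        (fun g' pv => pvUpd g' pv.1.1 pv.1.2 pv.2) g
      = ((PySem.List.pyRange C A (-1)).foldl (fun g' s => pvUpd g' s B (pvF g A B C D (s, B)))
         ((PySem.List.pyRange D B (-1)).foldl (fun g' s => pvUpd g' C s (pvF g A B C D (C, s)))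
          ((PySem.List.pyRange A C 1).foldl (fun g' s => pvUpd g' s D (pvF g A B C D (s, D)))
           ((PySem.List.pyRange B D 1).foldl (fun g' s => pvUpd g' A s (pvF g A B C D (A, s))) g)))) := by
    rw [hP]
    simp only [List.map_append, List.map_map, List.foldl_append, List.foldl_map, Function.comp_def]
  rw [hwrite, Prod.mk.injEq]
  refine ⟨?_, ?_⟩
  · -- the final grids agree pointwise
    funext r c
    simp only [colWrite, rowWrite]
    simp only [pvUpd_apply, pvF, PySem.List.mem_pyRange_one, PySem.List.mem_pyRange_neg_one]
    split_ifs <;> first | rfl | omega | (congr 1 <;> first | rfl | omega | (congr 1 <;> omega))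
  · -- the recorded minima agree
    change List.foldl min _ _ = _
    -- split the i = B element off A's fourth min-list
    rw [pyRange_neg_one_append_last (D - 1) (B - 1) (by omega),
        show (B : Int) - 1 + 1 = B by ring]
    rw [List.map_append, List.map_singleton, if_pos rfl]
    rw [List.map_congr_left (l := PySem.List.pyRange (D - 1) B (-1))
        (f := fun i => if i = B then g (A + 1) B else g A i) (g := fun i => g A i)
        (fun i hi => by
          rw [PySem.List.mem_pyRange_neg_one] at hi
          simp only []
          rw [if_neg (by omega)])]
    rw [List.foldl_append, List.foldl_cons, List.foldl_nil]
    have hle : List.foldl min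
        (List.foldl min
          (List.foldl min
            (List.foldl min (g A B) (List.map (fun i => g i B) (PySem.List.pyRange (A + 1) (C + 1))))
            (List.map (fun i => g C i) (PySem.List.pyRange (B + 1) (D + 1))))
          (List.map (fun i => g i D) (PySem.List.pyRange (C - 1) (A - 1) (-1))))
        (List.map (fun i => g A i) (PySem.List.pyRange (D - 1) B (-1))) ≤ g (A + 1) B := by
      refine le_trans (foldl_min_le_init _ _) ?_
      refine le_trans (foldl_min_le_init _ _) ?_
      refine le_trans (foldl_min_le_init _ _) ?_
      refine foldl_min_le_of_mem _ _ ?_ _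
      exact List.mem_map.mpr ⟨A + 1, by rw [PySem.List.mem_pyRange_one]; omega, rfl⟩
    rw [min_eq_left hle]
    -- B's min over the ring, head split off
    have hring_cons : P.map (fun p => g p.1 p.2)
        = g A B :: (List.map (fun c => g A c) (PySem.List.pyRange (B + 1) D) ++
            (List.map (fun r => g r D) (PySem.List.pyRange A C) ++
              (List.map (fun c => g C c) (PySem.List.pyRange D B (-1)) ++
                List.map (fun r => g r B) (PySem.List.pyRange C A (-1))))) := by
      rw [hP, PySem.List.pyRange_one_cons hBD]
      simp [List.map_append, List.map_map, Function.comp_def, List.append_assoc]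
    rw [hring_cons, PySem.List.min?_id_cons, Option.getD_some]
    have e4 : ∀ (l1 l2 l3 l4 : List Int) (x : Int),
        List.foldl min (List.foldl min (List.foldl min (List.foldl min x l1) l2) l3) l4
          = List.foldl min x (l1 ++ l2 ++ l3 ++ l4) := by
      intro l1 l2 l3 l4 x
      simp [List.foldl_append]
    rw [e4]
    -- the two value lists are permutations of each other
    have hMe1 : List.map (fun i => g i B) (PySem.List.pyRange (A + 1) (C + 1))
        = (List.map (fun r => g r B) (PySem.List.pyRange C A (-1))).reverse := by
      simp [PySem.List.pyRange_neg_one_eq_reverse]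
    have hMe2 : List.map (fun i => g C i) (PySem.List.pyRange (B + 1) (D + 1))
        = (List.map (fun c => g C c) (PySem.List.pyRange D B (-1))).reverse := by
      simp [PySem.List.pyRange_neg_one_eq_reverse]
    have hMe3 : List.map (fun i => g i D) (PySem.List.pyRange (C - 1) (A - 1) (-1))
        = (List.map (fun r => g r D) (PySem.List.pyRange A C 1)).reverse := by
      simp [PySem.List.pyRange_neg_one_eq_reverse]
    have hMe4 : List.map (fun i => g A i) (PySem.List.pyRange (D - 1) B (-1))
        = (List.map (fun c => g A c) (PySem.List.pyRange (B + 1) D)).reverse := by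
      simp [PySem.List.pyRange_neg_one_eq_reverse]
    refine List.Perm.foldl_op_eq ?_
    rw [hMe1, hMe2, hMe3, hMe4]
    refine (List.perm_iff_count).mpr (fun x => ?_)
    simp only [List.count_append, List.count_reverse]
    ring

theorem fold_eq (qs : List (List Int))
    (h : ∀ q ∈ qs, 4 ≤ q.length ∧ q.getD 0 0 < q.getD 2 0 ∧ q.getD 1 0 < q.getD 3 0) :
    ∀ (st : (Int → Int → Int) × List Int),
      qs.foldl (fun st q => let r := pvStepA st.1 q; (r.1, st.2 ++ [r.2])) st
      = qs.foldl (fun st q => let r := pvStepB st.1 q; (r.1, st.2 ++ [r.2])) st := by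
  induction qs with
  | nil => intro st; rfl
  | cons q t ih =>
    intro st
    have hq := h q (by simp)
    simp only [List.foldl_cons]
    rw [step_eq st.1 q hq.1 hq.2.1 hq.2.2]
    exact ih (fun x hx => h x (by simp [hx])) _

-- ===== VERDICT (by name: the statement is the Claim_ definition above) =====
theorem solution_spec : Claim_equal_solution := by
  intro rows columns queries _ hpre
  unfold Spec_solution solution solution_alt
  rw [fold_eq]
  intro q hq
  obtain ⟨h1, h2, h3, _, h5, h6, _⟩ := hpre q hq
  exact ⟨h1, h3, h6⟩
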